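-- pv_equiv track=rewrite | github.com/i-m-mll/feedbax | misc.py | exclude_unshared_keys_and_identical_values
-- ===== SOURCE A (Python) =====
-- def exclude_unshared_keys_and_identical_values(list_of_dicts):
--     """Filter dicts in a list to exclude unshared keys, and keys with identical values."""
--     if not list_of_dicts:
--         return []
--
--     common_keys = set(list_of_dicts[0].keys())
--     for d in list_of_dicts[1:]:
--         common_keys.intersection_update(d.keys())
--
--     keys_to_exclude = {
--         key
--         for key in common_keys
--         if all(d[key] == list_of_dicts[0][key] for d in list_of_dicts[1:])
--     }
--
--     return [
--         {k: v for k, v in original_dict.items() if k not in keys_to_exclude}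
--         for original_dict in list_of_dicts
--     ]
-- ===== SOURCE B (Python) =====
-- def exclude_unshared_keys_and_identical_values(list_of_dicts):
--     """Filter dicts in a list to exclude unshared keys, and keys with identical values."""
--     n = len(list_of_dicts)
--     grouped = {}
--     for d in list_of_dicts:
--         for k, v in d.items():
--             grouped.setdefault(k, []).append(v)
--     keys_to_exclude = {
--         k
--         for k, vals in grouped.items()
--         if len(vals) == n and all(v == vals[0] for v in vals[1:])
--     }
--     return [
--         {k: v for k, v in d.items() if k not in keys_to_exclude}
--         for d in list_of_dicts
--     ]
-- ===== Notes on version B (the rewrite author's own statement) =====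
-- stated objective: alternative
-- what changed: Replaces A's key-set intersection pass plus a per-common-key rescan of all dicts with one grouping sweep that transposes the data into key -> list of values, deciding exclusion by len(values) == len(list_of_dicts) and all-equal.
import Mathlib
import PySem

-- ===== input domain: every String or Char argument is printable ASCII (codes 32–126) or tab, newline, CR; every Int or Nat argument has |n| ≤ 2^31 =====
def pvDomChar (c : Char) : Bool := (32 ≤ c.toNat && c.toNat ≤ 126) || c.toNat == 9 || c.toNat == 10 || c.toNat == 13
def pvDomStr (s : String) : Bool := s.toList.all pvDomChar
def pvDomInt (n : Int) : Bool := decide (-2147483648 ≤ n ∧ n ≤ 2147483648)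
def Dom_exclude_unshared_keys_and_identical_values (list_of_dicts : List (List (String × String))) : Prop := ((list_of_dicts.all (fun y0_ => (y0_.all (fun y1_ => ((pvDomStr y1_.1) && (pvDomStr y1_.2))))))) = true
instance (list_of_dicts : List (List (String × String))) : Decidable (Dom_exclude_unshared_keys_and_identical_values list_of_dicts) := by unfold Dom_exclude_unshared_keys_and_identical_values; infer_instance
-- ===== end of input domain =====

-- B replaces A's key-set intersection + per-common-key rescan with one grouping sweep
-- (key -> list of its values in dict order); same cost, different decomposition.


-- ===== PORT A =====
-- dict lookup d[k], first match (keys are distinct under Pre_); "" default is never hit on present keys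
def pvLookup (d : List (String × String)) (k : String) : String :=
  ((d.find? (fun p => p.1 == k)).map Prod.snd).getD ""

def exclude_unshared_keys_and_identical_values (list_of_dicts : List (List (String × String))) : List (List (String × String)) :=
  match list_of_dicts with
  | [] => []
  | d0 :: rest =>
    let common_keys := rest.foldl (fun s d => s.filter (fun k => d.any (fun p => p.1 == k))) (PySem.List.dedup (d0.map Prod.fst))
    let keys_to_exclude := common_keys.filter (fun k => rest.all (fun d => pvLookup d k == pvLookup d0 k))
    (d0 :: rest).map (fun d => d.filter (fun p => !keys_to_exclude.contains p.1))

-- ===== PORT B =====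
def exclude_unshared_keys_and_identical_values_alt (list_of_dicts : List (List (String × String))) : List (List (String × String)) :=
  let n := list_of_dicts.length
  let grouped : PySem.Dict String (List String) :=
    list_of_dicts.foldl (fun g d => d.foldl (fun g p => g.modify p.1 [] (fun vs => vs ++ [p.2])) g) PySem.Dict.empty
  let keys_to_exclude :=
    (grouped.items.filter (fun kv => kv.2.length == n && kv.2.tail.all (fun v => v == kv.2.headD ""))).map Prod.fst
  list_of_dicts.map (fun d => d.filter (fun p => !keys_to_exclude.contains p.1))

-- ===== PRECONDITION & SPEC =====
-- Pre_ requires distinct keys inside each inner association list: each inner list stands for a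
-- Python dict, which cannot hold duplicate keys, so this excludes no input the Python A accepts.
def Pre_exclude_unshared_keys_and_identical_values (list_of_dicts : List (List (String × String))) : Prop :=
  ∀ d ∈ list_of_dicts, (d.map Prod.fst).Nodup
instance (list_of_dicts : List (List (String × String))) : Decidable (Pre_exclude_unshared_keys_and_identical_values list_of_dicts) := by unfold Pre_exclude_unshared_keys_and_identical_values; infer_instance

def pvWitness_exclude_unshared_keys_and_identical_values : (List (List (String × String))) :=
  [[("a", "1"), ("b", "2")], [("a", "1"), ("c", "3")]]

def Spec_exclude_unshared_keys_and_identical_values (list_of_dicts : List (List (String × String))) (out : List (List (String × String))) : Prop := out = exclude_unshared_keys_and_identical_values_alt list_of_dicts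
instance (list_of_dicts : List (List (String × String))) (out : List (List (String × String))) : Decidable (Spec_exclude_unshared_keys_and_identical_values list_of_dicts out) := by unfold Spec_exclude_unshared_keys_and_identical_values; infer_instance

-- ===== CLAIM (what is proved, stated in full; the proofs are below) =====
def Claim_equal_exclude_unshared_keys_and_identical_values : Prop := ∀ (list_of_dicts : List (List (String × String))), Dom_exclude_unshared_keys_and_identical_values list_of_dicts → Pre_exclude_unshared_keys_and_identical_values list_of_dicts → Spec_exclude_unshared_keys_and_identical_values list_of_dicts (exclude_unshared_keys_and_identical_values list_of_dicts)

-- ===== LEMMAS AND PROOFS =====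

-- A's exclusion-key list (the value of A's 'keys_to_exclude' for input d0 :: rest)
def pvExclA (d0 : List (String × String)) (rest : List (List (String × String))) : List String :=
  (rest.foldl (fun s d => s.filter (fun k => d.any (fun p => p.1 == k))) (PySem.List.dedup (d0.map Prod.fst))).filter
    (fun k => rest.all (fun d => pvLookup d k == pvLookup d0 k))

-- B's exclusion-key list
def pvExclB (L : List (List (String × String))) : List String :=
  ((L.foldl (fun g d => d.foldl (fun g p => g.modify p.1 [] (fun vs => vs ++ [p.2])) g) PySem.Dict.empty).items.filter
    (fun kv => kv.2.length == L.length && kv.2.tail.all (fun v => v == kv.2.headD ""))).map Prod.fst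

theorem pvA_eq (d0 : List (String × String)) (rest : List (List (String × String))) :
    exclude_unshared_keys_and_identical_values (d0 :: rest)
      = (d0 :: rest).map (fun d => d.filter (fun p => !(pvExclA d0 rest).contains p.1)) := rfl

theorem pvB_eq (L : List (List (String × String))) :
    exclude_unshared_keys_and_identical_values_alt L
      = L.map (fun d => d.filter (fun p => !(pvExclB L).contains p.1)) := rfl

theorem pvLookup_cons (p : String × String) (d : List (String × String)) (k : String) :
    pvLookup (p :: d) k = if p.1 == k then p.2 else pvLookup d k := by
  simp only [pvLookup, List.find?_cons]
  cases h : p.1 == k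
  · simp
  · simp

-- grouped.getD k [] collects, in dict order, the values stored under k
theorem pv_group_getD (L : List (List (String × String))) :
    ∀ (g : PySem.Dict String (List String)) (k : String),
      (L.foldl (fun g d => d.foldl (fun g p => g.modify p.1 [] (fun vs => vs ++ [p.2])) g) g).getD k []
        = g.getD k [] ++ L.flatMap (fun d => (d.filter (fun p => p.1 == k)).map Prod.snd) := by
  induction L with
  | nil => simp
  | cons d L ih =>
    intro g k
    simp only [List.foldl_cons, List.flatMap_cons, ih, PySem.Dict.getD_foldl_modify_append,
      List.append_assoc]

theorem pv_group_nodup (L : List (List (String × String))) :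
    ∀ (g : PySem.Dict String (List String)), g.keys.Nodup →
      (L.foldl (fun g d => d.foldl (fun g p => g.modify p.1 [] (fun vs => vs ++ [p.2])) g) g).keys.Nodup := by
  induction L with
  | nil => intro g hg; exact hg
  | cons d L ih =>
    intro g hg
    exact ih _ (PySem.Dict.nodup_keys_foldl_modify_key d Prod.fst []
      (fun _ p vs => vs ++ [p.2]) g hg)

-- one dict's contribution to the grouped values under key k
theorem pv_filt_vals (d : List (String × String)) (hd : (d.map Prod.fst).Nodup) (k : String) :
    (d.filter (fun p => p.1 == k)).map Prod.snd
      = if d.any (fun p => p.1 == k) then [pvLookup d k] else [] := by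
  induction d with
  | nil => simp
  | cons p d ih =>
    simp only [List.map_cons, List.nodup_cons] at hd
    by_cases h : p.1 = k
    · have hnil : d.filter (fun q => q.1 == k) = [] := by
        refine List.filter_eq_nil_iff.mpr fun q hq => ?_
        have : q.1 ≠ k := fun e => hd.1 (by rw [h, ← e]; exact List.mem_map_of_mem hq)
        simp [this]
      simp [List.any_cons, h, pvLookup_cons, hnil]
    · have hb : (p.1 == k) = false := by simp [h]
      simp [List.any_cons, hb, pvLookup_cons, ih hd.2]
      congr 1
      simp [hb]

theorem pv_vals_len (L : List (List (String × String))) (h : ∀ d ∈ L, (d.map Prod.fst).Nodup)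
    (k : String) :
    (L.flatMap (fun d => (d.filter (fun p => p.1 == k)).map Prod.snd)).length
      = L.countP (fun d => d.any (fun p => p.1 == k)) := by
  induction L with
  | nil => simp
  | cons d L ih =>
    rw [List.flatMap_cons, List.length_append, pv_filt_vals d (h d (by simp)) k,
      ih (fun d hd => h d (List.mem_cons_of_mem _ hd)), List.countP_cons]
    by_cases hc : d.any (fun p => p.1 == k) = true
    · simp [hc]; omega
    · simp [hc]

theorem pv_vals_map (L : List (List (String × String))) (h : ∀ d ∈ L, (d.map Prod.fst).Nodup)
    (k : String) (hall : ∀ d ∈ L, d.any (fun p => p.1 == k) = true) :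
    L.flatMap (fun d => (d.filter (fun p => p.1 == k)).map Prod.snd)
      = L.map (fun d => pvLookup d k) := by
  induction L with
  | nil => simp
  | cons d L ih =>
    rw [List.flatMap_cons, pv_filt_vals d (h d (by simp)) k, List.map_cons,
      ih (fun d hd => h d (List.mem_cons_of_mem _ hd)) (fun d hd => hall d (List.mem_cons_of_mem _ hd))]
    simp [hall d (by simp)]

theorem pv_common_mem (rest : List (List (String × String))) :
    ∀ (s : List String) (k : String),
      k ∈ rest.foldl (fun s d => s.filter (fun k => d.any (fun p => p.1 == k))) s
        ↔ (k ∈ s ∧ ∀ d ∈ rest, d.any (fun p => p.1 == k) = true) := by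
  induction rest with
  | nil => simp
  | cons d rest ih =>
    intro s k
    rw [List.foldl_cons, ih]
    simp only [List.mem_filter, List.forall_mem_cons]
    tauto

-- the heart: both exclusion lists have the same members
theorem pv_excl_mem (d0 : List (String × String)) (rest : List (List (String × String)))
    (hPre : ∀ d ∈ d0 :: rest, (d.map Prod.fst).Nodup) (k : String) :
    k ∈ pvExclA d0 rest ↔ k ∈ pvExclB (d0 :: rest) := by
  have hvals := pv_group_getD (d0 :: rest) PySem.Dict.empty k
  simp only [PySem.Dict.getD_empty, List.nil_append] at hvals
  have hnd := pv_group_nodup (d0 :: rest) PySem.Dict.empty PySem.Dict.nodup_keys_empty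
  constructor
  · -- A-side condition → B-side membership
    intro hA
    rw [pvExclA, List.mem_filter, pv_common_mem, PySem.List.mem_dedup] at hA
    obtain ⟨⟨hk0, hkrest⟩, heq⟩ := hA
    have hall : ∀ d ∈ d0 :: rest, d.any (fun p => p.1 == k) = true := by
      intro d hd
      rcases List.mem_cons.mp hd with h | h
      · subst h
        obtain ⟨p, hp, hpk⟩ := List.mem_map.mp hk0
        exact List.any_eq_true.mpr ⟨p, hp, by simp [hpk]⟩
      · exact hkrest d h
    have hv : (d0 :: rest).flatMap (fun d => (d.filter (fun p => p.1 == k)).map Prod.snd)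
        = (d0 :: rest).map (fun d => pvLookup d k) := pv_vals_map _ hPre k hall
    have hget : (((d0 :: rest).foldl (fun g d => d.foldl (fun g p => g.modify p.1 [] (fun vs => vs ++ [p.2])) g) PySem.Dict.empty)).get? k
        = some ((d0 :: rest).flatMap (fun d => (d.filter (fun p => p.1 == k)).map Prod.snd)) := by
      rcases hg : (((d0 :: rest).foldl (fun g d => d.foldl (fun g p => g.modify p.1 [] (fun vs => vs ++ [p.2])) g) PySem.Dict.empty)).get? k with _ | vs
      · exfalso
        have h0 := PySem.Dict.getD_of_get?_eq_none _ [] hg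
        rw [hvals, hv] at h0
        simp at h0
      · have h0 := PySem.Dict.getD_of_get?_eq_some _ [] hg
        rw [hvals] at h0
        rw [h0]
        exact hg
    rw [pvExclB, List.mem_map]
    refine ⟨(k, (d0 :: rest).flatMap (fun d => (d.filter (fun p => p.1 == k)).map Prod.snd)),
      List.mem_filter.mpr ⟨(PySem.Dict.get?_eq_some_iff_mem_items _ _ _ hnd).mp hget, ?_⟩, rfl⟩
    simp only [Bool.and_eq_true, beq_iff_eq]
    constructor
    · rw [hv]; simp
    · rw [hv]
      simp only [List.map_cons, List.tail_cons, List.headD_cons, List.all_eq_true, List.mem_map]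
      rintro v ⟨d, hd, rfl⟩
      have := List.all_eq_true.mp heq d hd
      simpa using this
  · -- B-side membership → A-side condition
    intro hB
    rw [pvExclB, List.mem_map] at hB
    obtain ⟨⟨k', vs⟩, hmem, rfl⟩ := hB
    rw [List.mem_filter] at hmem
    obtain ⟨hitems, hpred⟩ := hmem
    have hget := (PySem.Dict.get?_eq_some_iff_mem_items _ _ _ hnd).mpr hitems
    have hvs : vs = (d0 :: rest).flatMap (fun d => (d.filter (fun p => p.1 == k')).map Prod.snd) := by
      have := PySem.Dict.getD_of_get?_eq_some _ [] hget
      rw [pv_group_getD (d0 :: rest) PySem.Dict.empty k'] at this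
      simpa using this.symm
    have hlen : vs.length = (d0 :: rest).length := by
      have h1 := (Bool.and_eq_true _ _).mp hpred |>.1
      simpa using h1
    have htl := (Bool.and_eq_true _ _).mp hpred |>.2
    have hall : ∀ d ∈ d0 :: rest, d.any (fun p => p.1 == k') = true := by
      have hcnt : (d0 :: rest).countP (fun d => d.any (fun p => p.1 == k')) = (d0 :: rest).length := by
        rw [← pv_vals_len _ hPre k', ← hvs, hlen]
      exact List.countP_eq_length.mp hcnt
    have hv : (d0 :: rest).flatMap (fun d => (d.filter (fun p => p.1 == k')).map Prod.snd)
        = (d0 :: rest).map (fun d => pvLookup d k') := pv_vals_map _ hPre k' hall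
    have heq : ∀ d ∈ rest, pvLookup d k' = pvLookup d0 k' := by
      intro d hd
      have hmem2 : pvLookup d k' ∈ vs.tail := by
        rw [hvs, hv]
        simp only [List.map_cons, List.tail_cons]
        exact List.mem_map.mpr ⟨d, hd, rfl⟩
      have hth := List.all_eq_true.mp htl _ hmem2
      have hh : vs.headD "" = pvLookup d0 k' := by rw [hvs, hv]; simp
      rw [hh] at hth
      simpa using hth
    rw [pvExclA, List.mem_filter, pv_common_mem, PySem.List.mem_dedup]
    refine ⟨⟨?_, fun d hd => hall d (List.mem_cons_of_mem _ hd)⟩, ?_⟩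
    · obtain ⟨p, hp, hpk⟩ := List.any_eq_true.mp (hall d0 (by simp))
      exact List.mem_map.mpr ⟨p, hp, by simpa using hpk⟩
    · exact List.all_eq_true.mpr fun d hd => by simp [heq d hd]

-- ===== VERDICT (by name: the statement is the Claim_ definition above) =====
theorem exclude_unshared_keys_and_identical_values_spec : Claim_equal_exclude_unshared_keys_and_identical_values := by
  intro L _ hPre
  unfold Spec_exclude_unshared_keys_and_identical_values
  cases L with
  | nil => rfl
  | cons d0 rest =>
    rw [pvA_eq, pvB_eq]
    refine List.map_congr_left fun d _ => ?_
    refine List.filter_congr fun p _ => ?_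
    have h := pv_excl_mem d0 rest hPre p.1
    have h2 : (pvExclA d0 rest).contains p.1 = (pvExclB (d0 :: rest)).contains p.1 := by
      cases hA : (pvExclA d0 rest).contains p.1 <;> cases hB : (pvExclB (d0 :: rest)).contains p.1 <;>
        simp_all
    rw [h2]
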